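-- pv_equiv track=rewrite | github.com/coffeeandsecurity/DakshSCRA | tools/audit_rdl_refs.py | extract_external_anchor
-- ===== SOURCE A (Python) =====
-- def unwrap_regex_token(text: str) -> str:
--     raw = (text or "").strip()
--     if len(raw) >= 2 and raw[0] == "/" and raw.count("/") >= 2:
--         end = raw.rfind("/")
--         raw = raw[1:end]
--     return raw
--
-- def normalize_regex(text: str) -> str:
--     normalized = unwrap_regex_token((text or "").strip())
--     normalized = normalized.replace(r"\/", "/")
--     normalized = normalized.replace(r"\]", "]")
--     normalized = normalized.replace(r"\[", "[")
--     return " ".join(normalized.split())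
--
-- def extract_external_anchor(rdl_script: str) -> str:
--     for raw_line in (rdl_script or "").splitlines():
--         line = (raw_line or "").strip()
--         if not line or line.startswith("#"):
--             continue
--         upper = line.upper()
--         if upper.startswith("WHEN PRESENT "):
--             return normalize_regex(line[len("WHEN PRESENT "):])
--         if upper.startswith("WHEN CURRENT_FILE_MATCHES "):
--             return normalize_regex(line[len("WHEN CURRENT_FILE_MATCHES "):])
--     return ""
-- ===== SOURCE B (Python) =====
-- def unwrap_regex_token(text: str) -> str:
--     raw = (text or "").strip()
--     if len(raw) >= 2 and raw[0] == "/" and raw.count("/") >= 2: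
--         end = raw.rfind("/")
--         raw = raw[1:end]
--     return raw
--
-- def normalize_regex(text: str) -> str:
--     normalized = unwrap_regex_token((text or "").strip())
--     normalized = normalized.replace(r"\/", "/")
--     normalized = normalized.replace(r"\]", "]")
--     normalized = normalized.replace(r"\[", "[")
--     return " ".join(normalized.split())
--
-- _P1 = "WHEN PRESENT "
-- _P2 = "WHEN CURRENT_FILE_MATCHES "
--
-- def _first_index(lines, prefix):
--     for i, line in enumerate(lines):
--         if line.upper().startswith(prefix):
--             return i
--     return len(lines)
--
-- def extract_external_anchor(rdl_script: str) -> str: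
--     # Staged passes instead of one early-exit scan: strip every line once,
--     # compute the first index matching each directive prefix independently,
--     # and take the earlier of the two.  The blank/'#' filter of the original
--     # is redundant: such lines can match neither prefix.
--     lines = [raw.strip() for raw in (rdl_script or "").splitlines()]
--     i = min(_first_index(lines, _P1), _first_index(lines, _P2))
--     if i == len(lines):
--         return ""
--     line = lines[i]
--     prefix = _P1 if line.upper().startswith(_P1) else _P2
--     return normalize_regex(line[len(prefix):])
-- ===== Notes on version B (the rewrite author's own statement) =====
-- stated objective: alternative
-- what changed: Replaces A's single early-exit loop (skip blank/comment lines, two ordered prefix ifs) by staged passes: strip all lines once, independently find the first index matching each directive prefix, take the minimum index and dispatch on which prefix that line carries; the blank/comment filter is dropped as provably redundant.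
import Mathlib
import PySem

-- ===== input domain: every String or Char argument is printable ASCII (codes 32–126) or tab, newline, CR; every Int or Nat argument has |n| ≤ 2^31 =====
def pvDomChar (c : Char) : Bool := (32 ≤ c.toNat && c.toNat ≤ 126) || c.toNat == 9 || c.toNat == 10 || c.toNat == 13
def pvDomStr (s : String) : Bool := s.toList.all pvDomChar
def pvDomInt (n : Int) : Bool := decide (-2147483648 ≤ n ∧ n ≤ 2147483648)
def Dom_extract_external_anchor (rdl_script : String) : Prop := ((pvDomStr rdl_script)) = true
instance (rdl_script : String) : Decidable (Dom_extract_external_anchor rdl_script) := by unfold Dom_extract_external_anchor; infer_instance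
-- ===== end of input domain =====

-- B replaces A's single early-exit scan by staged passes: strip all lines once, find
-- the first index matching each directive prefix independently, take the earlier one
-- and dispatch on which prefix that line carries (the blank/'#' filter is redundant).
-- Objective: alternative decomposition, same cost.

-- shared helpers (identical in Source A and Source B): unwrap_regex_token / normalize_regex
def unwrapRegexToken (text : List Char) : List Char :=
  let raw := PySem.Chars.strip text
  if 2 ≤ raw.length ∧ raw[0]? = some '/' ∧ 2 ≤ PySem.Chars.count raw ['/'] then
    let e := PySem.Chars.rfind raw ['/']
    PySem.List.slice raw (some 1) (some e)
  else raw

def normalizeRegex (text : List Char) : List Char :=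
  let n0 := unwrapRegexToken (PySem.Chars.strip text)
  let n1 := PySem.Chars.replace n0 ['\\', '/'] ['/']
  let n2 := PySem.Chars.replace n1 ['\\', ']'] [']']
  let n3 := PySem.Chars.replace n2 ['\\', '['] ['[']
  PySem.Chars.join [' '] (PySem.Chars.split₀ n3)

-- ===== PORT A =====
-- A's explicit loop: skip blank/comment lines, test the two prefixes in order,
-- return on the first hit.
def eeaLoopA : List (List Char) → List Char
  | [] => []
  | raw :: rest =>
    let line := PySem.Chars.strip raw
    if line.isEmpty || PySem.Chars.startswith line ['#'] then eeaLoopA rest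
    else
      let upper := PySem.Chars.upper line
      if PySem.Chars.startswith upper "WHEN PRESENT ".toList then
        normalizeRegex (PySem.List.slice line (some 13) none)
      else if PySem.Chars.startswith upper "WHEN CURRENT_FILE_MATCHES ".toList then
        normalizeRegex (PySem.List.slice line (some 26) none)
      else eeaLoopA rest

def extract_external_anchor (rdl_script : String) : String :=
  String.ofList (eeaLoopA (PySem.Chars.splitlines rdl_script.toList))

-- ===== PORT B =====
def eeaP1 : List Char := "WHEN PRESENT ".toList
def eeaP2 : List Char := "WHEN CURRENT_FILE_MATCHES ".toList

-- Source B's _first_index: index of the first line matching the prefix, else length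
def eeaFirstIdx : List (List Char) → List Char → Nat
  | [], _ => 0
  | line :: rest, p =>
    if PySem.Chars.startswith (PySem.Chars.upper line) p then 0
    else eeaFirstIdx rest p + 1

-- Source B's body after the stripping pass (on the list of stripped lines)
def eeaCoreB (lines : List (List Char)) : List Char :=
  let i := min (eeaFirstIdx lines eeaP1) (eeaFirstIdx lines eeaP2)
  if i = lines.length then []
  else
    let line := lines.getD i []
    let p := if PySem.Chars.startswith (PySem.Chars.upper line) eeaP1 then eeaP1 else eeaP2
    normalizeRegex (PySem.List.slice line (some (p.length : Int)) none)

def extract_external_anchor_alt (rdl_script : String) : String :=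
  String.ofList
    (eeaCoreB ((PySem.Chars.splitlines rdl_script.toList).map PySem.Chars.strip))

-- ===== PRECONDITION & SPEC =====
def Spec_extract_external_anchor (rdl_script : String) (out : String) : Prop := out = extract_external_anchor_alt rdl_script
instance (rdl_script : String) (out : String) : Decidable (Spec_extract_external_anchor rdl_script out) := by unfold Spec_extract_external_anchor; infer_instance

-- ===== CLAIM (what is proved, stated in full; the proofs are below) =====
def Claim_equal_extract_external_anchor : Prop := ∀ (rdl_script : String), Dom_extract_external_anchor rdl_script → Spec_extract_external_anchor rdl_script (extract_external_anchor rdl_script)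

-- ===== LEMMAS AND PROOFS =====

-- a blank or comment line matches neither prefix
lemma eea_skip_nomatch (line : List Char)
    (h : (line.isEmpty || PySem.Chars.startswith line ['#']) = true) :
    PySem.Chars.startswith (PySem.Chars.upper line) eeaP1 = false ∧
      PySem.Chars.startswith (PySem.Chars.upper line) eeaP2 = false := by
  match line with
  | [] => exact ⟨rfl, rfl⟩
  | c :: t =>
    have hc : c = '#' := by
      simp [PySem.Chars.startswith, List.isPrefixOf] at h
      exact h.symm
    subst hc
    have hu : PySem.Chars.upperChar '#' = '#' := by decide
    constructor <;>
      simp [PySem.Chars.startswith, PySem.Chars.upper, eeaP1, eeaP2, List.isPrefixOf, hu]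

-- dropping a non-matching head line leaves B's result unchanged
lemma eeaCoreB_cons_nomatch (line : List Char) (L : List (List Char))
    (h1 : PySem.Chars.startswith (PySem.Chars.upper line) eeaP1 = false)
    (h2 : PySem.Chars.startswith (PySem.Chars.upper line) eeaP2 = false) :
    eeaCoreB (line :: L) = eeaCoreB L := by
  simp only [eeaCoreB, eeaFirstIdx, h1, h2, if_false, Bool.false_eq_true,
    Nat.succ_min_succ, List.length_cons]
  by_cases hm : min (eeaFirstIdx L eeaP1) (eeaFirstIdx L eeaP2) = L.length
  · simp [hm]
  · rw [if_neg (by omega), if_neg hm]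
    simp

lemma eeaLoopA_eq (ls : List (List Char)) :
    eeaLoopA ls = eeaCoreB (ls.map PySem.Chars.strip) := by
  induction ls with
  | nil => rfl
  | cons raw rest ih =>
    rw [show List.map PySem.Chars.strip (raw :: rest)
        = PySem.Chars.strip raw :: List.map PySem.Chars.strip rest from rfl]
    set line := PySem.Chars.strip raw with hline
    by_cases hb : (line.isEmpty || PySem.Chars.startswith line ['#']) = true
    · obtain ⟨h1, h2⟩ := eea_skip_nomatch line hb
      rw [eeaCoreB_cons_nomatch line _ h1 h2, ← ih]
      simp only [eeaLoopA]
      rw [if_pos hb]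
    · have hA : eeaLoopA (raw :: rest) =
          (if PySem.Chars.startswith (PySem.Chars.upper line) eeaP1 then
            normalizeRegex (PySem.List.slice line (some 13) none)
          else if PySem.Chars.startswith (PySem.Chars.upper line) eeaP2 then
            normalizeRegex (PySem.List.slice line (some 26) none)
          else eeaLoopA rest) := by
        simp only [eeaLoopA, eeaP1, eeaP2]
        rw [← hline, if_neg (by simpa using hb)]
        rfl
      rw [hA]
      by_cases h1 : PySem.Chars.startswith (PySem.Chars.upper line) eeaP1 = true
      · rw [if_pos h1]
        simp only [eeaCoreB, eeaFirstIdx, h1, if_true, Nat.zero_min,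
          List.length_cons, List.getD]
        rw [if_neg (by omega)]
        simp only [List.getElem?_cons_zero, Option.getD_some]
        rw [if_pos h1]
        have hl : ((eeaP1.length : Nat) : Int) = 13 := by decide
        rw [hl]
      · rw [if_neg h1]
        by_cases h2 : PySem.Chars.startswith (PySem.Chars.upper line) eeaP2 = true
        · rw [if_pos h2]
          simp only [eeaCoreB, eeaFirstIdx, h1, h2, if_true, Bool.false_eq_true,
            if_false, Nat.min_zero, List.length_cons, List.getD]
          rw [if_neg (by omega)]
          simp only [List.getElem?_cons_zero, Option.getD_some]
          rw [if_neg h1]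
          have hl : ((eeaP2.length : Nat) : Int) = 26 := by decide
          rw [hl]
        · rw [if_neg h2]
          rw [eeaCoreB_cons_nomatch line _ (by simpa using h1) (by simpa using h2)]
          exact ih

-- ===== VERDICT (by name: the statement is the Claim_ definition above) =====
theorem extract_external_anchor_spec : Claim_equal_extract_external_anchor := by
  intro s _
  show _ = _
  simp [extract_external_anchor, extract_external_anchor_alt, eeaLoopA_eq]
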